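-- pv_equiv track=rewrite | github.com/798982876/ST_ResNet | data_module/data_process.py | get_rows_cols
-- ===== SOURCE A (Python) =====
-- def get_rows_cols(data_from_groupby):
--     r = []
--     c = []
--     # 获取行号列号
--     for row in data_from_groupby:
--         r.append(row[3])
--         c.append(row[4])
--     maxr = max(r)
--     minr = min(r)
--     maxc = max(c)
--     minc = min(c)
--
--     r1 = maxr - minr + 1
--     c1 = maxc - minc + 1
--     return (r1, c1, minr, minc)
-- ===== SOURCE B (Python) =====
-- def get_rows_cols(data_from_groupby):
--     it = iter(data_from_groupby)
--     first = next(it)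
--     minr = maxr = first[3]
--     minc = maxc = first[4]
--     for row in it:
--         minr = min(minr, row[3])
--         maxr = max(maxr, row[3])
--         minc = min(minc, row[4])
--         maxc = max(maxc, row[4])
--     return (maxr - minr + 1, maxc - minc + 1, minr, minc)
-- ===== Notes on version B (the rewrite author's own statement) =====
-- stated objective: alternative
-- what changed: B replaces the two accumulator lists plus four separate min/max scans with a single pass maintaining four running extrema seeded from the first row, allocating no intermediate lists.
import Mathlib
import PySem

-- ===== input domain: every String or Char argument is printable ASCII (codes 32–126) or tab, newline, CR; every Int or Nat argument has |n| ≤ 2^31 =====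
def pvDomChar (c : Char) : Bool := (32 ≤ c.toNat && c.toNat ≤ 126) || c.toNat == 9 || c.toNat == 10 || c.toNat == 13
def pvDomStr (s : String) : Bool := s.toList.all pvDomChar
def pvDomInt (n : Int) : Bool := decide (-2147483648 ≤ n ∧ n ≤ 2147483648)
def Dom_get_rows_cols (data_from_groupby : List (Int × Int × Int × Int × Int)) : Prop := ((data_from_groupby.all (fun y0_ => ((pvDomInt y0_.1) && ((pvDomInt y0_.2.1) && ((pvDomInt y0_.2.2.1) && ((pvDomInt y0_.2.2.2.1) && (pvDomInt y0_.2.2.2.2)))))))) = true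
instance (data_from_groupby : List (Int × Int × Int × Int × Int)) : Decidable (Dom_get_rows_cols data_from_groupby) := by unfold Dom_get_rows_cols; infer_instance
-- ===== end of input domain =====

-- B folds the list once with four running extrema instead of building two lists and scanning them four times; one traversal, O(1) extra space.

-- ===== PORT A =====
-- the for-loop appending row[3]/row[4] to r and c
def get_rows_cols (data_from_groupby : List (Int × Int × Int × Int × Int)) : Int × Int × Int × Int :=
  let rc := data_from_groupby.foldl
    (fun (p : List Int × List Int) row => (p.1 ++ [row.2.2.2.1], p.2 ++ [row.2.2.2.2]))
    (([] : List Int), ([] : List Int))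
  -- max()/min() on a list; A raises ValueError on [], excluded by Pre_, so getD 0 is never used there
  let maxr := (PySem.List.max? rc.1 (fun x => x)).getD 0
  let minr := (PySem.List.min? rc.1 (fun x => x)).getD 0
  let maxc := (PySem.List.max? rc.2 (fun x => x)).getD 0
  let minc := (PySem.List.min? rc.2 (fun x => x)).getD 0
  (maxr - minr + 1, maxc - minc + 1, minr, minc)

-- ===== PORT B =====
def get_rows_cols_alt : List (Int × Int × Int × Int × Int) → Int × Int × Int × Int
  | [] => (0, 0, 0, 0)   -- B raises StopIteration here; outside Pre_
  | first :: rest =>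
    let st := rest.foldl
      (fun (s : Int × Int × Int × Int) row =>
        (min s.1 row.2.2.2.1, max s.2.1 row.2.2.2.1, min s.2.2.1 row.2.2.2.2, max s.2.2.2 row.2.2.2.2))
      (first.2.2.2.1, first.2.2.2.1, first.2.2.2.2, first.2.2.2.2)
    (st.2.1 - st.1 + 1, st.2.2.2 - st.2.2.1 + 1, st.1, st.2.2.1)

-- ===== PRECONDITION & SPEC =====
-- A raises ValueError (max of empty sequence) on the empty list; excluded.
def Pre_get_rows_cols (data_from_groupby : List (Int × Int × Int × Int × Int)) : Prop :=
  data_from_groupby ≠ []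
instance (data_from_groupby : List (Int × Int × Int × Int × Int)) : Decidable (Pre_get_rows_cols data_from_groupby) := by unfold Pre_get_rows_cols; infer_instance
def pvWitness_get_rows_cols : (List (Int × Int × Int × Int × Int)) := [(0, 0, 0, 2, 5), (1, 1, 1, 7, 3)]
def Spec_get_rows_cols (data_from_groupby : List (Int × Int × Int × Int × Int)) (out : Int × Int × Int × Int) : Prop := out = get_rows_cols_alt data_from_groupby
instance (data_from_groupby : List (Int × Int × Int × Int × Int)) (out : Int × Int × Int × Int) : Decidable (Spec_get_rows_cols data_from_groupby out) := by unfold Spec_get_rows_cols; infer_instance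

-- ===== CLAIM =====
def Claim_equal_get_rows_cols : Prop := ∀ (data_from_groupby : List (Int × Int × Int × Int × Int)), Dom_get_rows_cols data_from_groupby → Pre_get_rows_cols data_from_groupby → Spec_get_rows_cols data_from_groupby (get_rows_cols data_from_groupby)

-- ===== LEMMAS AND PROOFS =====

-- A's accumulator loop just maps out the two columns.
theorem foldl_two_cols (xs : List (Int × Int × Int × Int × Int)) (r c : List Int) :
    xs.foldl (fun (p : List Int × List Int) row => (p.1 ++ [row.2.2.2.1], p.2 ++ [row.2.2.2.2])) (r, c)
      = (r ++ xs.map (fun row => row.2.2.2.1), c ++ xs.map (fun row => row.2.2.2.2)) := by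
  induction xs generalizing r c with
  | nil => simp
  | cons x t ih => simp [List.foldl, ih]

-- B's fused fold computes the four running extrema of the two mapped columns.
theorem foldl_quad (xs : List (Int × Int × Int × Int × Int)) (a b c d : Int) :
    xs.foldl
      (fun (s : Int × Int × Int × Int) row =>
        (min s.1 row.2.2.2.1, max s.2.1 row.2.2.2.1, min s.2.2.1 row.2.2.2.2, max s.2.2.2 row.2.2.2.2))
      (a, b, c, d)
      = ((xs.map (fun row => row.2.2.2.1)).foldl min a,
         (xs.map (fun row => row.2.2.2.1)).foldl max b,
         (xs.map (fun row => row.2.2.2.2)).foldl min c,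
         (xs.map (fun row => row.2.2.2.2)).foldl max d) := by
  induction xs generalizing a b c d with
  | nil => simp
  | cons x t ih => simp [List.foldl, ih]

-- ===== VERDICT =====
theorem get_rows_cols_spec : Claim_equal_get_rows_cols := by
  intro d _ hpre
  cases d with
  | nil => exact absurd rfl hpre
  | cons first rest =>
    show _ = _
    simp only [get_rows_cols, get_rows_cols_alt, foldl_two_cols, foldl_quad,
      List.nil_append, List.map_cons]
    simp [PySem.List.max?_id_cons, PySem.List.min?_id_cons]
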